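-- pv_equiv track=rewrite | github.com/bdeornelas/bdeornelas.github.io | scripts/convert_articles_to_md.py | strip_fallback_snippet
-- ===== SOURCE A (Python) =====
-- FALLBACK_MARKERS = [
--     "<!-- Fallback: se GitHub Pages non applica il layout Jekyll, carica gli asset minimi qui -->",
--     "https://cdn.tailwindcss.com",
--     "https://unpkg.com/aos@2.3.1/dist/aos.css",
--     "https://unpkg.com/aos@2.3.1/dist/aos.js",
--     "/assets/css/style.min.css",
--     "https://unpkg.com/lucide@latest",
-- ]
--
-- def strip_fallback_snippet(text: str) -> str:
--     lines = text.splitlines()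
--     keep = []
--     skip_ids = set()
--
--     # remove explicit fallback asset lines
--     for i, line in enumerate(lines):
--         if any(marker in line for marker in FALLBACK_MARKERS):
--             skip_ids.add(i)
--
--     # remove the container wrapper open line if present
--     for i, line in enumerate(lines):
--         if '<div class="container mx-auto px-4 sm:px-6 lg:px-8">' in line:
--             skip_ids.add(i)
--             # also try to remove a trailing standalone closing </div> added as pair (search from bottom)
--             for j in range(len(lines) - 1, -1, -1):
--                 if lines[j].strip() == "</div>":
--                     skip_ids.add(j)
--                     break
--             break
--
--     # remove fallback init script block if present
--     in_fallback_script = False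
--     for i, line in enumerate(lines):
--         if "<!-- Fallback init script" in line:
--             in_fallback_script = True
--             skip_ids.add(i)
--             continue
--         if in_fallback_script:
--             skip_ids.add(i)
--             if "</script>" in line:
--                 in_fallback_script = False
--
--     for i, line in enumerate(lines):
--         if i not in skip_ids:
--             keep.append(line)
--
--     return "\n".join(keep) + ("\n" if keep and keep[-1] != "" else "")
-- ===== SOURCE B (Python) =====
-- FALLBACK_MARKERS = [
--     "<!-- Fallback: se GitHub Pages non applica il layout Jekyll, carica gli asset minimi qui -->",
--     "https://cdn.tailwindcss.com",
--     "https://unpkg.com/aos@2.3.1/dist/aos.css",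
--     "https://unpkg.com/aos@2.3.1/dist/aos.js",
--     "/assets/css/style.min.css",
--     "https://unpkg.com/lucide@latest",
-- ]
--
-- _CONTAINER_OPEN = '<div class="container mx-auto px-4 sm:px-6 lg:px-8">'
-- _INIT_MARKER = "<!-- Fallback init script"
--
--
-- def strip_fallback_snippet(text: str) -> str:
--     lines = text.splitlines()
--     # one pre-scan: first line holding the container-open marker, last standalone </div>
--     open_idx = None
--     close_idx = None
--     for i, line in enumerate(lines):
--         if open_idx is None and _CONTAINER_OPEN in line:
--             open_idx = i
--         if line.strip() == "</div>":
--             close_idx = i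
--     if open_idx is None:
--         close_idx = None
--     # one forward pass with a script-block flag, building keep directly
--     keep = []
--     in_script = False
--     for i, line in enumerate(lines):
--         if _INIT_MARKER in line:
--             in_script = True
--             continue
--         if in_script:
--             if "</script>" in line:
--                 in_script = False
--             continue
--         if i == open_idx or i == close_idx or any(m in line for m in FALLBACK_MARKERS):
--             continue
--         keep.append(line)
--     return "\n".join(keep) + ("\n" if keep and keep[-1] != "" else "")
-- ===== Notes on version B (the rewrite author's own statement) =====
-- stated objective: simpler
-- what changed: A builds an index skip-set in four separate enumeration passes (markers, container open plus bottom-up </div> search, script-block, then a filtering pass); B does one pre-scan recording the first container-open line and the last standalone </div>, then a single forward pass with an in_script flag that builds the keep list directly.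
import Mathlib
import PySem

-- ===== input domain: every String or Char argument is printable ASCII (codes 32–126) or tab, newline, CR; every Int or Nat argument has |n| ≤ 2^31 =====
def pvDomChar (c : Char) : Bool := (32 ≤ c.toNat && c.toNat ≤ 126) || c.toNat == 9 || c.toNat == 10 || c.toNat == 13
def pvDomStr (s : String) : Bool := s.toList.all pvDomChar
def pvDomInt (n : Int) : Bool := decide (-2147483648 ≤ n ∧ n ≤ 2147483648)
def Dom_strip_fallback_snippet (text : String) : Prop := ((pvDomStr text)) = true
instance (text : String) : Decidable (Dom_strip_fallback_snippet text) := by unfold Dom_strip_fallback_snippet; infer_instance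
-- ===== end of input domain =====

-- B replaces A's four passes and index skip-set by one pre-scan for the two container indices
-- plus a single forward pass with a script-block flag building the keep list directly (objective: simpler).

-- shared module constants
def pvMarkers : List String := [
  "<!-- Fallback: se GitHub Pages non applica il layout Jekyll, carica gli asset minimi qui -->",
  "https://cdn.tailwindcss.com",
  "https://unpkg.com/aos@2.3.1/dist/aos.css",
  "https://unpkg.com/aos@2.3.1/dist/aos.js",
  "/assets/css/style.min.css",
  "https://unpkg.com/lucide@latest"]
def pvContainerOpen : String := "<div class=\"container mx-auto px-4 sm:px-6 lg:px-8\">"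
def pvInitMarker : String := "<!-- Fallback init script"

-- ===== PORT A =====
-- pass 1: add indices of lines containing a fallback marker
def pvSkipMarkers : List (Int × String) → PySem.Set Int → PySem.Set Int
  | [], s => s
  | (i, l) :: rest, s =>
      pvSkipMarkers rest (if pvMarkers.any (fun m => PySem.Str.isIn m l) then s.add i else s)

-- inner loop of pass 2: 'for j in range(len-1,-1,-1): if lines[j].strip()=="</div>": … break',
-- transliterated as a first-match scan over the reversed enumeration
def pvFindClose : List (Int × String) → Option Int
  | [] => none
  | (j, l) :: rest => if PySem.Str.strip l == "</div>" then some j else pvFindClose rest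

-- pass 2: container open line (break at first hit) plus the bottom-most standalone </div>
def pvSkipContainer (lines : List String) : List (Int × String) → PySem.Set Int → PySem.Set Int
  | [], s => s
  | (i, l) :: rest, s =>
      if PySem.Str.isIn pvContainerOpen l then
        match pvFindClose (PySem.List.enumerate lines).reverse with
        | some j => (s.add i).add j
        | none => s.add i
      else pvSkipContainer lines rest s

-- pass 3: fallback init script block
def pvSkipScript : List (Int × String) → Bool → PySem.Set Int → PySem.Set Int
  | [], _, s => s
  | (i, l) :: rest, fl, s =>
      if PySem.Str.isIn pvInitMarker l then pvSkipScript rest true (s.add i)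
      else if fl then
        pvSkipScript rest (if PySem.Str.isIn "</script>" l then false else true) (s.add i)
      else pvSkipScript rest fl s

-- final pass: keep lines whose index is not in skip_ids
def pvKeepA (skip : PySem.Set Int) : List (Int × String) → List String → List String
  | [], k => k
  | (i, l) :: rest, k => pvKeepA skip rest (if skip.contains i then k else k ++ [l])

def strip_fallback_snippet (text : String) : String :=
  let lines := PySem.Str.splitlines text
  let e := PySem.List.enumerate lines
  let s1 := pvSkipMarkers e PySem.Set.empty
  let s2 := pvSkipContainer lines e s1
  let s3 := pvSkipScript e false s2
  let keep := pvKeepA s3 e []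
  PySem.Str.join "\n" keep ++ (if keep ≠ [] ∧ keep.getLast? ≠ some "" then "\n" else "")

-- ===== PORT B =====
-- single pre-scan: first line containing the container-open marker, last line stripping to "</div>"
def pvScanB : List (Int × String) → Option Int → Option Int → Option Int × Option Int
  | [], o, c => (o, c)
  | (i, l) :: rest, o, c =>
      pvScanB rest (if o.isNone && PySem.Str.isIn pvContainerOpen l then some i else o)
        (if PySem.Str.strip l == "</div>" then some i else c)

-- single forward pass with the in_script flag, building keep directly
def pvPassB (o c : Option Int) : List (Int × String) → Bool → List String → List String
  | [], _, k => k
  | (i, l) :: rest, fl, k =>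
      if PySem.Str.isIn pvInitMarker l then pvPassB o c rest true k
      else if fl then pvPassB o c rest (!(PySem.Str.isIn "</script>" l)) k
      else if (some i == o) || (some i == c) || pvMarkers.any (fun m => PySem.Str.isIn m l) then
        pvPassB o c rest fl k
      else pvPassB o c rest fl (k ++ [l])

def strip_fallback_snippet_alt (text : String) : String :=
  let lines := PySem.Str.splitlines text
  let e := PySem.List.enumerate lines
  let oc := pvScanB e none none
  let o := oc.1
  let c := if o.isNone then none else oc.2
  let keep := pvPassB o c e false []
  PySem.Str.join "\n" keep ++ (if keep ≠ [] ∧ keep.getLast? ≠ some "" then "\n" else "")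

-- ===== PRECONDITION & SPEC =====
def Spec_strip_fallback_snippet (text : String) (out : String) : Prop := out = strip_fallback_snippet_alt text
instance (text : String) (out : String) : Decidable (Spec_strip_fallback_snippet text out) := by unfold Spec_strip_fallback_snippet; infer_instance

-- ===== CLAIM (what is proved, stated in full; the proofs are below) =====
def Claim_equal_strip_fallback_snippet : Prop := ∀ (text : String), Dom_strip_fallback_snippet text → Spec_strip_fallback_snippet text (strip_fallback_snippet text)

-- ===== LEMMAS AND PROOFS =====

theorem pv_contains_add (s : PySem.Set Int) (x y : Int) :
    (s.add x).contains y = (s.contains y || y == x) := by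
  rw [Bool.eq_iff_iff]
  simp [PySem.Set.mem_add]

-- which lines A's pass 1 marks
theorem pvSkipMarkers_contains (es : List (Int × String)) (s : PySem.Set Int) (x : Int) :
    (pvSkipMarkers es s).contains x =
      (s.contains x || es.any (fun p => pvMarkers.any (fun m => PySem.Str.isIn m p.2) && x == p.1)) := by
  induction es generalizing s with
  | nil => simp [pvSkipMarkers]
  | cons p rest ih =>
      obtain ⟨i, l⟩ := p
      simp only [pvSkipMarkers, List.any_cons]
      rw [ih]
      cases h : pvMarkers.any (fun m => PySem.Str.isIn m l) <;> rw [Bool.eq_iff_iff] <;>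
        (try simp [pv_contains_add]) <;> (try tauto)

-- pvFindClose is a first-match scan
theorem pvFindClose_eq (es : List (Int × String)) :
    pvFindClose es = (es.find? (fun p => PySem.Str.strip p.2 == "</div>")).map (·.1) := by
  induction es with
  | nil => simp [pvFindClose]
  | cons p rest ih =>
      obtain ⟨j, l⟩ := p
      simp only [pvFindClose, List.find?_cons]
      cases h : (PySem.Str.strip l == "</div>") <;> simp [ih]

-- which lines A's pass 2 marks
def pvContHit (lines : List String) (es : List (Int × String)) (x : Int) : Bool :=
  match (es.find? (fun p => PySem.Str.isIn pvContainerOpen p.2)).map (·.1) with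
  | none => false
  | some i =>
      x == i || (match pvFindClose (PySem.List.enumerate lines).reverse with
                 | some j => x == j
                 | none => false)

theorem pvSkipContainer_contains (lines : List String) (es : List (Int × String))
    (s : PySem.Set Int) (x : Int) :
    (pvSkipContainer lines es s).contains x = (s.contains x || pvContHit lines es x) := by
  induction es generalizing s with
  | nil => simp [pvSkipContainer, pvContHit]
  | cons p rest ih =>
      obtain ⟨i, l⟩ := p
      simp only [pvSkipContainer, pvContHit, List.find?_cons]
      cases h : PySem.Str.isIn pvContainerOpen l
      · rw [if_neg Bool.false_ne_true, ih]
        simp [pvContHit]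
      · cases hf : pvFindClose (PySem.List.enumerate lines).reverse <;>
          rw [Bool.eq_iff_iff] <;> simp [pv_contains_add] <;> tauto

-- which lines A's pass 3 marks, as a function of the start state
def pvScripted : List (Int × String) → Bool → Int → Bool
  | [], _, _ => false
  | (i, l) :: rest, fl, x =>
      if PySem.Str.isIn pvInitMarker l then (x == i || pvScripted rest true x)
      else if fl then (x == i || pvScripted rest (if PySem.Str.isIn "</script>" l then false else true) x)
      else pvScripted rest fl x

theorem pvSkipScript_contains (es : List (Int × String)) (fl : Bool) (s : PySem.Set Int) (x : Int) :
    (pvSkipScript es fl s).contains x = (s.contains x || pvScripted es fl x) := by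
  induction es generalizing s fl with
  | nil => simp [pvSkipScript, pvScripted]
  | cons p rest ih =>
      obtain ⟨i, l⟩ := p
      simp only [pvSkipScript, pvScripted]
      cases h1 : PySem.Str.isIn pvInitMarker l <;> cases fl <;>
        simp only [Bool.false_eq_true, reduceIte, ih] <;>
        rw [Bool.eq_iff_iff] <;> simp [pv_contains_add] <;> tauto

theorem pvScripted_not_mem (es : List (Int × String)) (fl : Bool) (x : Int)
    (hx : x ∉ es.map (·.1)) : pvScripted es fl x = false := by
  induction es generalizing fl with
  | nil => simp [pvScripted]
  | cons p rest ih =>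
      obtain ⟨i, l⟩ := p
      simp only [List.map_cons, List.mem_cons, not_or] at hx
      have hxi : (x == i) = false := by simp [hx.1]
      simp only [pvScripted, hxi]
      split_ifs <;> simp [ih _ hx.2]

-- B's pre-scan computes first open and last close
theorem pvScanB_eq (es : List (Int × String)) (o c : Option Int) :
    pvScanB es o c =
      ((match o with
        | some i => some i
        | none => (es.find? (fun p => PySem.Str.isIn pvContainerOpen p.2)).map (·.1)),
       (match (es.reverse.find? (fun p => PySem.Str.strip p.2 == "</div>")).map (·.1) with
        | some j => some j
        | none => c)) := by
  induction es generalizing o c with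
  | nil => cases o <;> simp [pvScanB]
  | cons p rest ih =>
      obtain ⟨i, l⟩ := p
      rw [pvScanB, ih]
      simp only [Prod.mk.injEq, List.reverse_cons, List.find?_append, List.find?_cons]
      constructor
      · cases o
        · cases h : PySem.Str.isIn pvContainerOpen l <;> simp
        · simp
      · cases hf : List.find? (fun p => PySem.Str.strip p.2 == "</div>") rest.reverse <;>
          cases h : (PySem.Str.strip l == "</div>") <;> simp [Option.orElse]

-- in a fst-distinct enumeration, the marker test at an index is the line's own test
theorem pv_any_at (es : List (Int × String)) (x : Int) (l : String)
    (hnd : es.Pairwise (fun p q => p.1 ≠ q.1)) (hmem : (x, l) ∈ es) :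
    es.any (fun p => pvMarkers.any (fun m => PySem.Str.isIn m p.2) && x == p.1) =
      pvMarkers.any (fun m => PySem.Str.isIn m l) := by
  induction es with
  | nil => simp at hmem
  | cons p rest ih =>
      obtain ⟨i, l'⟩ := p
      rw [List.pairwise_cons] at hnd
      rcases List.mem_cons.mp hmem with heq | hmem'
      · rw [Prod.mk.injEq] at heq
        obtain ⟨rfl, rfl⟩ := heq
        have hr : rest.any (fun p => pvMarkers.any (fun m => PySem.Str.isIn m p.2) && x == p.1) = false := by
          rw [List.any_eq_false]
          intro p hp
          have hne : x ≠ p.1 := hnd.1 p hp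
          simp [hne]
        simp only [List.any_cons]
        rw [hr]
        simp
      · have hxi : (x == i) = false := by
          have hne : i ≠ x := hnd.1 (x, l) hmem'
          simp [hne.symm]
        simp only [List.any_cons]
        rw [hxi, ih hnd.2 hmem']
        simp

-- the central bridge: A's set-filter pass equals B's stateful pass
theorem pv_main (S : PySem.Set Int) (O C : Option Int) :
    ∀ (es : List (Int × String)) (fl : Bool) (k : List String),
      es.Pairwise (fun p q => p.1 ≠ q.1) →
      (∀ p ∈ es, S.contains p.1 =
        (pvMarkers.any (fun m => PySem.Str.isIn m p.2) || (some p.1 == O) || (some p.1 == C) ||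
          pvScripted es fl p.1)) →
      pvKeepA S es k = pvPassB O C es fl k := by
  intro es
  induction es with
  | nil => intro fl k _ _; rfl
  | cons p rest ih =>
      intro fl k hnd hS
      obtain ⟨i, l⟩ := p
      rw [List.pairwise_cons] at hnd
      have hne : ∀ q ∈ rest, i ≠ q.1 := hnd.1
      have hSi : S.contains i =
          (pvMarkers.any (fun m => PySem.Str.isIn m l) || (some i == O) || (some i == C) ||
            pvScripted ((i, l) :: rest) fl i) := hS (i, l) (List.mem_cons_self ..)
      cases h1 : PySem.Str.isIn pvInitMarker l
      case true =>
        have hsc : pvScripted ((i, l) :: rest) fl i = true := by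
          simp only [pvScripted, h1, reduceIte]
          simp
        have hci : S.contains i = true := by rw [hSi, hsc]; simp
        simp only [pvKeepA, pvPassB, h1, hci, reduceIte]
        refine ih true k hnd.2 ?_
        intro q hq
        have hq' := hS q (List.mem_cons_of_mem _ hq)
        have hqi : (q.1 == i) = false := by simp [Ne.symm (hne q hq)]
        rwa [show pvScripted ((i, l) :: rest) fl q.1 = pvScripted rest true q.1 by
          simp only [pvScripted, h1, reduceIte, hqi]
          simp] at hq'
      case false =>
        cases fl
        case true =>
          have hsc : pvScripted ((i, l) :: rest) true i = true := by
            simp only [pvScripted, h1, reduceIte, Bool.false_eq_true]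
            simp
          have hci : S.contains i = true := by rw [hSi, hsc]; simp
          have hflip : (if PySem.Str.isIn "</script>" l then false else true) =
              !PySem.Str.isIn "</script>" l := by
            cases hcl : PySem.Str.isIn "</script>" l <;> simp
          simp only [pvKeepA, pvPassB, h1, hci, reduceIte, Bool.false_eq_true]
          refine ih (!PySem.Str.isIn "</script>" l) k hnd.2 ?_
          intro q hq
          have hq' := hS q (List.mem_cons_of_mem _ hq)
          have hqi : (q.1 == i) = false := by simp [Ne.symm (hne q hq)]
          rwa [show pvScripted ((i, l) :: rest) true q.1 =
              pvScripted rest (!PySem.Str.isIn "</script>" l) q.1 by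
            simp only [pvScripted, h1, reduceIte, Bool.false_eq_true, hqi, hflip]
            simp] at hq'
        case false =>
          have hsc0 : pvScripted rest false i = false := by
            refine pvScripted_not_mem rest false i ?_
            intro hmem
            obtain ⟨q, hq, hq1⟩ := List.mem_map.mp hmem
            exact hne q hq hq1.symm
          have hsc : pvScripted ((i, l) :: rest) false i = false := by
            simp only [pvScripted, h1, reduceIte, Bool.false_eq_true]
            exact hsc0
          have hci : S.contains i =
              ((some i == O) || (some i == C) || pvMarkers.any (fun m => PySem.Str.isIn m l)) := by
            rw [hSi, hsc]
            cases pvMarkers.any (fun m => PySem.Str.isIn m l) <;>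
              cases (some i == O) <;> cases (some i == C) <;> rfl
          have htail : ∀ p ∈ rest, S.contains p.1 =
              (pvMarkers.any (fun m => PySem.Str.isIn m p.2) || (some p.1 == O) || (some p.1 == C) ||
                pvScripted rest false p.1) := by
            intro q hq
            have hq' := hS q (List.mem_cons_of_mem _ hq)
            rwa [show pvScripted ((i, l) :: rest) false q.1 = pvScripted rest false q.1 by
              simp only [pvScripted, h1, reduceIte, Bool.false_eq_true]] at hq'
          cases hk : ((some i == O) || (some i == C) || pvMarkers.any (fun m => PySem.Str.isIn m l))
          case true =>
            have hci' : S.contains i = true := by rw [hci, hk]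
            simp only [pvKeepA, pvPassB, h1, hci', hk, reduceIte, Bool.false_eq_true]
            exact ih false k hnd.2 htail
          case false =>
            have hci' : S.contains i = false := by rw [hci, hk]
            simp only [pvKeepA, pvPassB, h1, hci', hk, reduceIte, Bool.false_eq_true]
            exact ih false (k ++ [l]) hnd.2 htail

-- fst-distinctness of the enumeration
theorem pv_enum_nodup (lines : List String) :
    (PySem.List.enumerate lines).Pairwise (fun p q : Int × String => p.1 ≠ q.1) :=
  (PySem.List.pairwise_lt_enumerate lines 0).imp (fun h => ne_of_lt h)

-- the keep lists agree
theorem pv_keep_eq (lines : List String) :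
    pvKeepA (pvSkipScript (PySem.List.enumerate lines) false
        (pvSkipContainer lines (PySem.List.enumerate lines)
          (pvSkipMarkers (PySem.List.enumerate lines) PySem.Set.empty)))
      (PySem.List.enumerate lines) [] =
    pvPassB (pvScanB (PySem.List.enumerate lines) none none).1
      (if (pvScanB (PySem.List.enumerate lines) none none).1.isNone then none
       else (pvScanB (PySem.List.enumerate lines) none none).2)
      (PySem.List.enumerate lines) false [] := by
  have hscan := pvScanB_eq (PySem.List.enumerate lines) none none
  have hO : (pvScanB (PySem.List.enumerate lines) none none).1 =
      ((PySem.List.enumerate lines).find? (fun p => PySem.Str.isIn pvContainerOpen p.2)).map (·.1) := by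
    rw [hscan]
  have hC2 : (pvScanB (PySem.List.enumerate lines) none none).2 =
      match ((PySem.List.enumerate lines).reverse.find?
          (fun p => PySem.Str.strip p.2 == "</div>")).map (·.1) with
      | some j => some j
      | none => none := by
    rw [hscan]
  rw [hO, hC2]
  refine pv_main _ _ _ _ false [] (pv_enum_nodup lines) ?_
  intro p hp
  rw [pvSkipScript_contains, pvSkipContainer_contains, pvSkipMarkers_contains,
    pv_any_at _ p.1 p.2 (pv_enum_nodup lines) (by simpa using hp),
    show PySem.Set.empty.contains p.1 = false from by
      simp [PySem.Set.contains_eq_listContains, PySem.Set.empty],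
    pvContHit, pvFindClose_eq]
  cases hFO : ((PySem.List.enumerate lines).find?
      (fun p => PySem.Str.isIn pvContainerOpen p.2)).map (·.1) with
  | none =>
      cases hLC : (((PySem.List.enumerate lines).reverse.find?
          (fun p => PySem.Str.strip p.2 == "</div>")).map (·.1)) <;>
        rw [Bool.eq_iff_iff] <;> simp [or_assoc] <;> (try tauto)
  | some a =>
      cases hLC : (((PySem.List.enumerate lines).reverse.find?
          (fun p => PySem.Str.strip p.2 == "</div>")).map (·.1)) <;>
        rw [Bool.eq_iff_iff] <;> simp [or_assoc] <;> (try tauto)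

-- ===== VERDICT (by name: the statement is the Claim_ definition above) =====
theorem strip_fallback_snippet_spec : Claim_equal_strip_fallback_snippet := by
  intro text _
  unfold Spec_strip_fallback_snippet strip_fallback_snippet strip_fallback_snippet_alt
  have h := pv_keep_eq (PySem.Str.splitlines text)
  simp only []
  rw [h]
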